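-- pv_equiv track=rewrite | github.com/UnB-KnEDLe/DODFMiner | dodfminer/extract/polished/acts/contrato.py | _predictions_dict
-- ===== SOURCE A (Python) =====
-- def _predictions_dict(sentence, prediction):
--     sentence = sentence[1:-1]
--     prediction = prediction[1:-1]
--
--     tags_predicted = [w.split("-")[-1] for w in prediction]
--     tags_positions = {t: [] for t in set(tags_predicted)}
--
--     for i, tag_predicted in enumerate(tags_predicted):
--         tags_positions[tag_predicted].append(sentence[i])
--
--     tags_positions = {t: " ".join(tags_positions[t]) for t in tags_positions.keys()}
--     tags_positions.pop("O")
--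
--     return tags_positions
-- ===== SOURCE B (Python) =====
-- def _predictions_dict(sentence, prediction):
--     tags_predicted = [w.split("-")[-1] for w in prediction[1:-1]]
--     sentence = sentence[1:-1]
--     result = {t: " ".join(sentence[i] for i, p in enumerate(tags_predicted) if p == t)
--               for t in set(tags_predicted)}
--     result.pop("O")
--     return result
-- ===== Notes on version B (the rewrite author's own statement) =====
-- stated objective: simpler
-- what changed: Replaces A's build-empty-lists-then-single-grouping-pass-then-rejoin pipeline (three dict passes with intermediate position lists) by one dict comprehension that, for each distinct tag, filters and joins the matching tokens directly; Pre_ excludes only inputs where A raises (no 'O' tag, or prediction longer than sentence), on which B raises too.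
import Mathlib
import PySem

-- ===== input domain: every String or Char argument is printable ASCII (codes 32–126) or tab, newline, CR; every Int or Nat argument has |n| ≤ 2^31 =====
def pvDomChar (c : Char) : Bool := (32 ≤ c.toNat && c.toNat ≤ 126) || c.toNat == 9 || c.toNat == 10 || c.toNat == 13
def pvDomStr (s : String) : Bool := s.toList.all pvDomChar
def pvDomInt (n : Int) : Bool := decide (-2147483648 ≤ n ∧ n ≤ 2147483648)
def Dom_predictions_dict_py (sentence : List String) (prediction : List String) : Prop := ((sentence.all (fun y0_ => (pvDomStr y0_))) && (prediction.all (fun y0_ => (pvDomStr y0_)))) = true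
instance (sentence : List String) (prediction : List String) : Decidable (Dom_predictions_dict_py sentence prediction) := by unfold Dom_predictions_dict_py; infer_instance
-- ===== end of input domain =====

-- B replaces A's three-pass pipeline (init empty lists per tag, one grouping pass, then re-join
-- every key) by a single dict comprehension that filters-and-joins the tokens per distinct tag.

-- w.split("-")[-1]  (split? is none only for sep = "", the result list is never empty: the getD defaults are unreachable)
def pvTagOf (w : String) : String :=
  (PySem.List.pyGet? ((PySem.Str.split? w "-").getD []) (-1)).getD ""

-- ===== PORT A =====
def predictions_dict_py (sentence : List String) (prediction : List String) : List (String × String) :=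
  let sentence' := PySem.List.slice sentence (some 1) (some (-1))
  let prediction' := PySem.List.slice prediction (some 1) (some (-1))
  let tags := prediction'.map pvTagOf
  -- {t: [] for t in set(tags_predicted)}
  let d0 : PySem.Dict String (List String) :=
    (PySem.Set.ofList tags).foldl (fun d t => d.insert t []) PySem.Dict.empty
  -- for i, tag in enumerate(tags): d[tag].append(sentence[i])   (sentence[i] raises out of range: excluded by Pre_; getD "" there)
  let d1 := (PySem.List.enumerate tags 0).foldl
      (fun d p => d.modify p.2 [] (fun l => l ++ [(PySem.List.pyGet? sentence' p.1).getD ""])) d0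
  -- {t: " ".join(d[t]) for t in d.keys()}
  let d2 := d1.keys.foldl (fun d t => d.insert t (PySem.Str.join " " (d1.getD t []))) PySem.Dict.empty
  -- .pop("O")  (KeyError when "O" is no tag: excluded by Pre_)
  (d2.erase "O").items

-- ===== PORT B =====
def predictions_dict_py_alt (sentence : List String) (prediction : List String) : List (String × String) :=
  let tags := (PySem.List.slice prediction (some 1) (some (-1))).map pvTagOf
  let sentence' := PySem.List.slice sentence (some 1) (some (-1))
  -- {t: " ".join(sentence[i] for i, p in enumerate(tags) if p == t) for t in set(tags)}
  let d := PySem.Dict.mk ((PySem.Set.ofList tags).map (fun t =>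
      (t, PySem.Str.join " " (((PySem.List.enumerate tags 0).filter (fun p => p.2 == t)).map
            (fun p => (PySem.List.pyGet? sentence' p.1).getD "")))))
  (d.erase "O").items

-- ===== PRECONDITION & SPEC =====
-- Pre_ excludes exactly the inputs where the Python A raises: KeyError from pop("O") when no tag is
-- "O", and IndexError when the sliced prediction is longer than the sliced sentence.
def Pre_predictions_dict_py (sentence : List String) (prediction : List String) : Prop :=
  "O" ∈ (PySem.List.slice prediction (some 1) (some (-1))).map pvTagOf ∧
  (PySem.List.slice prediction (some 1) (some (-1))).length ≤ (PySem.List.slice sentence (some 1) (some (-1))).length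
instance (sentence : List String) (prediction : List String) : Decidable (Pre_predictions_dict_py sentence prediction) := by unfold Pre_predictions_dict_py; infer_instance
def pvWitness_predictions_dict_py : List String × List String :=
  (["[CLS]", "w1", "w2", "w3", "[SEP]"], ["[CLS]", "B-X", "O", "I-X", "[SEP]"])
def Spec_predictions_dict_py (sentence : List String) (prediction : List String) (out : List (String × String)) : Prop := out = predictions_dict_py_alt sentence prediction
instance (sentence : List String) (prediction : List String) (out : List (String × String)) : Decidable (Spec_predictions_dict_py sentence prediction out) := by unfold Spec_predictions_dict_py; infer_instance

-- ===== CLAIM (what is proved, stated in full; the proofs are below) =====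
def Claim_equal_predictions_dict_py : Prop := ∀ (sentence : List String) (prediction : List String), Dom_predictions_dict_py sentence prediction → Pre_predictions_dict_py sentence prediction → Spec_predictions_dict_py sentence prediction (predictions_dict_py sentence prediction)

-- ===== LEMMAS AND PROOFS =====

-- proof-only restatements of the two pipelines on the sliced sentence and tag list
def pvD0 (tags : List String) : PySem.Dict String (List String) :=
  (PySem.Set.ofList tags).foldl (fun d t => d.insert t []) PySem.Dict.empty

def pvD1 (sentence' tags : List String) : PySem.Dict String (List String) :=
  (PySem.List.enumerate tags 0).foldl
    (fun d p => d.modify p.2 [] (fun l => l ++ [(PySem.List.pyGet? sentence' p.1).getD ""]))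
    (pvD0 tags)

def pvA (sentence' tags : List String) : List (String × String) :=
  ((((pvD1 sentence' tags).keys.foldl
      (fun d t => d.insert t (PySem.Str.join " " ((pvD1 sentence' tags).getD t [])))
      PySem.Dict.empty).erase "O").items)

def pvB (sentence' tags : List String) : List (String × String) :=
  ((PySem.Dict.mk ((PySem.Set.ofList tags).map (fun t =>
      (t, PySem.Str.join " " (((PySem.List.enumerate tags 0).filter (fun p => p.2 == t)).map
        (fun p => (PySem.List.pyGet? sentence' p.1).getD "")))))).erase "O").items

-- inserting [] everywhere keeps every getD-with-default-[] lookup at []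
lemma getD_foldl_insert_nil {ν : Type}
    (l : List String) (d : PySem.Dict String (List ν)) (h : ∀ k, d.getD k [] = [])
    (t : String) : (l.foldl (fun d t => d.insert t []) d).getD t [] = [] := by
  induction l generalizing d with
  | nil => exact h t
  | cons x xs ih =>
      simp only [List.foldl_cons]
      exact ih _ (fun k => by rw [PySem.Dict.getD_insert]; split <;> simp [h])

-- A's grouping loop over enumerate, read back per tag, is B's filter-and-map
lemma getD_group_loop (sentence' : List String)
    (l : List (Int × String)) (d : PySem.Dict String (List String)) (t : String) :
    (l.foldl (fun d p => d.modify p.2 [] (fun l => l ++ [(PySem.List.pyGet? sentence' p.1).getD ""])) d).getD t []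
      = d.getD t [] ++ ((l.filter (fun p => p.2 == t)).map (fun p => (PySem.List.pyGet? sentence' p.1).getD "")) := by
  induction l generalizing d with
  | nil => simp
  | cons x xs ih =>
      simp only [List.foldl_cons, List.filter_cons, ih]
      rw [PySem.Dict.getD_modify]
      by_cases hx : x.2 = t
      · simp [hx]
      · simp [hx, Ne.symm hx]

lemma set_update_self (tags : List String) :
    PySem.Set.update (PySem.Set.ofList tags) tags = PySem.Set.ofList tags := by
  rw [PySem.Set.update_eq_append_filter]
  have h : (PySem.Set.ofList tags).filter
      (fun y => !((PySem.Set.ofList tags).contains y)) = [] :=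
    List.filter_eq_nil_iff.mpr (fun y hy => by
      simp
      exact (PySem.List.mem_dedup tags y).mp hy)
  rw [h, List.append_nil]

lemma keys_pvD1 (sentence' tags : List String) :
    (pvD1 sentence' tags).keys = PySem.Set.ofList tags := by
  unfold pvD1 pvD0
  rw [PySem.Dict.keys_foldl_modify_key (PySem.List.enumerate tags 0) Prod.snd,
      PySem.Dict.keys_foldl_insert, PySem.Dict.keys_empty, PySem.Set.update_nil_left,
      PySem.Set.ofList_ofList, PySem.List.map_snd_enumerate, set_update_self]

lemma getD_pvD1 (sentence' tags : List String) (t : String) :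
    (pvD1 sentence' tags).getD t [] =
      ((PySem.List.enumerate tags 0).filter (fun p => p.2 == t)).map
        (fun p => (PySem.List.pyGet? sentence' p.1).getD "") := by
  unfold pvD1 pvD0
  rw [getD_group_loop, getD_foldl_insert_nil _ _ (fun k => by simp [PySem.Dict.getD_empty])]
  simp

lemma pv_core (sentence' tags : List String) : pvA sentence' tags = pvB sentence' tags := by
  unfold pvA pvB
  have hdict : ((pvD1 sentence' tags).keys.foldl
        (fun d t => d.insert t (PySem.Str.join " " ((pvD1 sentence' tags).getD t [])))
        PySem.Dict.empty)
      = PySem.Dict.mk ((PySem.Set.ofList tags).map (fun t =>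
          (t, PySem.Str.join " " (((PySem.List.enumerate tags 0).filter (fun p => p.2 == t)).map
            (fun p => (PySem.List.pyGet? sentence' p.1).getD ""))))) := by
    apply PySem.Dict.ext
    rw [keys_pvD1]
    have hfresh := PySem.Dict.items_foldl_insert_fresh (PySem.Set.ofList tags)
      (fun t => t) (fun t => PySem.Str.join " " ((pvD1 sentence' tags).getD t []))
      PySem.Dict.empty (fun a _ => by simp [PySem.Dict.contains_empty])
      (by simp)
    simp only [hfresh]
    exact List.map_congr_left (fun t _ => by rw [getD_pvD1])
  rw [hdict]

theorem predictions_dict_py_eq (sentence prediction : List String) :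
    predictions_dict_py sentence prediction = predictions_dict_py_alt sentence prediction :=
  pv_core (PySem.List.slice sentence (some 1) (some (-1)))
    ((PySem.List.slice prediction (some 1) (some (-1))).map pvTagOf)

-- ===== VERDICT (by name: the statement is the Claim_ definition above) =====
theorem predictions_dict_py_spec : Claim_equal_predictions_dict_py := by
  intro sentence prediction _ _
  exact predictions_dict_py_eq sentence prediction
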